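-- pv_equiv track=rewrite | github.com/nicolastd5/pdf-ocr | pdf_ocr_qt/ner.py | _static_find_bbox
-- ===== SOURCE A (Python) =====
-- def _static_find_bbox(ent_text, words, token_bboxes, word_char_starts,
--                       start_char, end_char):
--     matched = []
--     for i, (w, cs) in enumerate(zip(words, word_char_starts)):
--         ce = cs + len(w)
--         if cs >= start_char and ce <= end_char:
--             matched.append(token_bboxes[i])
--     if not matched:
--         return (0, 0, 0, 0)
--     x  = min(b[0] for b in matched)
--     y  = min(b[1] for b in matched)
--     x2 = max(b[0] + b[2] for b in matched)
--     y2 = max(b[1] + b[3] for b in matched)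
--     return (x, y, x2 - x, y2 - y)
-- ===== SOURCE B (Python) =====
-- def _static_find_bbox(ent_text, words, token_bboxes, word_char_starts,
--                       start_char, end_char):
--     # Single pass: maintain running min/max accumulators instead of
--     # building a matched list and scanning it four times.
--     acc = None
--     for i, (w, cs) in enumerate(zip(words, word_char_starts)):
--         if cs >= start_char and cs + len(w) <= end_char:
--             x, y, bw, bh = token_bboxes[i]
--             if acc is None:
--                 acc = (x, y, x + bw, y + bh)
--             else:
--                 acc = (min(acc[0], x), min(acc[1], y),
--                        max(acc[2], x + bw), max(acc[3], y + bh))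
--     if acc is None:
--         return (0, 0, 0, 0)
--     return (acc[0], acc[1], acc[2] - acc[0], acc[3] - acc[1])
-- ===== Notes on version B (the rewrite author's own statement) =====
-- stated objective: alternative
-- what changed: Instead of building a matched-bbox list and scanning it four times with min/max generator expressions, B makes a single pass over zip(words, word_char_starts) maintaining one running (minx, miny, maxx2, maxy2) accumulator and never materialises the matched list.
import Mathlib
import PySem

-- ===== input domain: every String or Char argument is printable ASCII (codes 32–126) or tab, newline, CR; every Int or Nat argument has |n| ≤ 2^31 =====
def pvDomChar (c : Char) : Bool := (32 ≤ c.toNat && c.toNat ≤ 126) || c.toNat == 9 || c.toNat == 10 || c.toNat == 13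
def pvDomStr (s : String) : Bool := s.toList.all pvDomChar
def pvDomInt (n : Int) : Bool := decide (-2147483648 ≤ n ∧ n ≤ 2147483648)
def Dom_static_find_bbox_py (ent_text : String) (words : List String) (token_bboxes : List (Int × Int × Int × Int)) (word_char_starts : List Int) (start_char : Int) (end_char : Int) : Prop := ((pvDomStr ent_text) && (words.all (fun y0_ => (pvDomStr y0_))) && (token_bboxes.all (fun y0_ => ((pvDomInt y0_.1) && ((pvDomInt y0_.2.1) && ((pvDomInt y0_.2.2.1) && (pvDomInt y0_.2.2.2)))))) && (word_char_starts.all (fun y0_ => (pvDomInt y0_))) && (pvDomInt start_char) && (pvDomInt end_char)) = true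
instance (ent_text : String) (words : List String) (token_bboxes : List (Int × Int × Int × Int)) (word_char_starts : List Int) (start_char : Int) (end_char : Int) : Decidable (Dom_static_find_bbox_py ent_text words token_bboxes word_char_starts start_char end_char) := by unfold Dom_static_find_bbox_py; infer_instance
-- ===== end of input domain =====

-- B replaces A's build-matched-list-then-four-min/max-scans by a single pass that
-- maintains one running (minx, miny, maxx2, maxy2) accumulator (objective: one-pass alternative).

-- ===== PORT A =====
-- the 'for i, (w, cs) in enumerate(zip(...))' loop collecting matched bboxes;
-- 'none' = IndexError from token_bboxes[i] (excluded by Pre_)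
def pvCollectA (tb : List (Int × Int × Int × Int)) (sc ec : Int) :
    List (Int × (String × Int)) → Option (List (Int × Int × Int × Int))
  | [] => some []
  | (i, w, cs) :: rest =>
    if cs ≥ sc ∧ cs + PySem.Str.len w ≤ ec then
      match PySem.List.pyGet? tb i with
      | none => none
      | some b => (pvCollectA tb sc ec rest).map (fun ms => b :: ms)
    else pvCollectA tb sc ec rest

def static_find_bbox_py (ent_text : String) (words : List String) (token_bboxes : List (Int × Int × Int × Int)) (word_char_starts : List Int) (start_char : Int) (end_char : Int) : Int × Int × Int × Int :=
  match pvCollectA token_bboxes start_char end_char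
      (PySem.List.enumerate (words.zip word_char_starts) 0) with
  | none => (0, 0, 0, 0)        -- IndexError in Python; unreachable under Pre_
  | some [] => (0, 0, 0, 0)     -- 'if not matched'
  | some matched =>
    let x  := (PySem.List.min? (matched.map (fun b : Int × Int × Int × Int => b.1)) (fun v => v)).getD 0
    let y  := (PySem.List.min? (matched.map (fun b : Int × Int × Int × Int => b.2.1)) (fun v => v)).getD 0
    let x2 := (PySem.List.max? (matched.map (fun b : Int × Int × Int × Int => b.1 + b.2.2.1)) (fun v => v)).getD 0
    let y2 := (PySem.List.max? (matched.map (fun b : Int × Int × Int × Int => b.2.1 + b.2.2.2)) (fun v => v)).getD 0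
    (x, y, x2 - x, y2 - y)

-- ===== PORT B =====
-- B's single loop with the running accumulator 'acc : Option bbox';
-- outer 'none' = IndexError from token_bboxes[i] (excluded by Pre_)
def pvLoopB (tb : List (Int × Int × Int × Int)) (sc ec : Int) :
    List (Int × (String × Int)) → Option (Int × Int × Int × Int) →
    Option (Option (Int × Int × Int × Int))
  | [], acc => some acc
  | (i, w, cs) :: rest, acc =>
    if cs ≥ sc ∧ cs + PySem.Str.len w ≤ ec then
      match PySem.List.pyGet? tb i with
      | none => none
      | some (x, y, bw, bh) =>
        pvLoopB tb sc ec rest (some (match acc with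
          | none => (x, y, x + bw, y + bh)
          | some (a, b, c, d) => (min a x, min b y, max c (x + bw), max d (y + bh))))
    else pvLoopB tb sc ec rest acc

def static_find_bbox_py_alt (ent_text : String) (words : List String) (token_bboxes : List (Int × Int × Int × Int)) (word_char_starts : List Int) (start_char : Int) (end_char : Int) : Int × Int × Int × Int :=
  match pvLoopB token_bboxes start_char end_char
      (PySem.List.enumerate (words.zip word_char_starts) 0) none with
  | none => (0, 0, 0, 0)        -- IndexError in Python; unreachable under Pre_
  | some none => (0, 0, 0, 0)   -- no word matched
  | some (some (a, b, c, d)) => (a, b, c - a, d - b)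

-- ===== PRECONDITION & SPEC =====
-- Pre_ excludes exactly the inputs where Python A raises IndexError: a matched word
-- (cs ≥ start_char and cs + len(w) ≤ end_char) whose position is out of range of token_bboxes.
def Pre_static_find_bbox_py (ent_text : String) (words : List String) (token_bboxes : List (Int × Int × Int × Int)) (word_char_starts : List Int) (start_char : Int) (end_char : Int) : Prop :=
  ∀ p ∈ PySem.List.enumerate (words.zip word_char_starts) 0,
    (p.2.2 ≥ start_char ∧ p.2.2 + PySem.Str.len p.2.1 ≤ end_char) →
    PySem.Raise.InRange token_bboxes.length p.1
instance (ent_text : String) (words : List String) (token_bboxes : List (Int × Int × Int × Int)) (word_char_starts : List Int) (start_char : Int) (end_char : Int) : Decidable (Pre_static_find_bbox_py ent_text words token_bboxes word_char_starts start_char end_char) := by unfold Pre_static_find_bbox_py; infer_instance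

def pvWitness_static_find_bbox_py : String × List String × (List (Int × Int × Int × Int)) × List Int × Int × Int :=
  ("ab cd", ["ab", "cd"], [(1, 2, 3, 4), (2, 1, 5, 2)], [0, 3], 0, 7)

def Spec_static_find_bbox_py (ent_text : String) (words : List String) (token_bboxes : List (Int × Int × Int × Int)) (word_char_starts : List Int) (start_char : Int) (end_char : Int) (out : Int × Int × Int × Int) : Prop := out = static_find_bbox_py_alt ent_text words token_bboxes word_char_starts start_char end_char
instance (ent_text : String) (words : List String) (token_bboxes : List (Int × Int × Int × Int)) (word_char_starts : List Int) (start_char : Int) (end_char : Int) (out : Int × Int × Int × Int) : Decidable (Spec_static_find_bbox_py ent_text words token_bboxes word_char_starts start_char end_char out) := by unfold Spec_static_find_bbox_py; infer_instance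

-- ===== CLAIM (what is proved, stated in full; the proofs are below) =====
def Claim_equal_static_find_bbox_py : Prop := ∀ (ent_text : String) (words : List String) (token_bboxes : List (Int × Int × Int × Int)) (word_char_starts : List Int) (start_char : Int) (end_char : Int), Dom_static_find_bbox_py ent_text words token_bboxes word_char_starts start_char end_char → Pre_static_find_bbox_py ent_text words token_bboxes word_char_starts start_char end_char → Spec_static_find_bbox_py ent_text words token_bboxes word_char_starts start_char end_char (static_find_bbox_py ent_text words token_bboxes word_char_starts start_char end_char)

-- ===== LEMMAS AND PROOFS =====

-- B's accumulator update, named for the proofs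
def pvUpd (acc : Option (Int × Int × Int × Int)) (p : Int × Int × Int × Int) :
    Option (Int × Int × Int × Int) :=
  some (match acc with
    | none => (p.1, p.2.1, p.1 + p.2.2.1, p.2.1 + p.2.2.2)
    | some (a, b, c, d) => (min a p.1, min b p.2.1, max c (p.1 + p.2.2.1), max d (p.2.1 + p.2.2.2)))

theorem pvWitness_ok :
    Dom_static_find_bbox_py (pvWitness_static_find_bbox_py.1) (pvWitness_static_find_bbox_py.2.1) (pvWitness_static_find_bbox_py.2.2.1) (pvWitness_static_find_bbox_py.2.2.2.1) (pvWitness_static_find_bbox_py.2.2.2.2.1) (pvWitness_static_find_bbox_py.2.2.2.2.2) ∧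
    Pre_static_find_bbox_py (pvWitness_static_find_bbox_py.1) (pvWitness_static_find_bbox_py.2.1) (pvWitness_static_find_bbox_py.2.2.1) (pvWitness_static_find_bbox_py.2.2.2.1) (pvWitness_static_find_bbox_py.2.2.2.2.1) (pvWitness_static_find_bbox_py.2.2.2.2.2) := by
  decide

-- Under Pre_, A's collecting loop never hits an IndexError
theorem pvCollectA_isSome (tb : List (Int × Int × Int × Int)) (sc ec : Int)
    (L : List (Int × (String × Int)))
    (h : ∀ p ∈ L, (p.2.2 ≥ sc ∧ p.2.2 + PySem.Str.len p.2.1 ≤ ec) →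
          PySem.Raise.InRange tb.length p.1) :
    ∃ M, pvCollectA tb sc ec L = some M := by
  induction L with
  | nil => exact ⟨[], rfl⟩
  | cons p rest ih =>
    obtain ⟨i, w, cs⟩ := p
    obtain ⟨M, hM⟩ := ih (fun q hq => h q (List.mem_cons_of_mem _ hq))
    by_cases hc : cs ≥ sc ∧ cs + PySem.Str.len w ≤ ec
    · have hin := h (i, w, cs) (List.mem_cons_self) hc
      rcases hg : PySem.List.pyGet? tb i with _ | b
      · exact absurd ((PySem.List.pyGet?_eq_none_iff tb i).1 hg) (not_not_intro hin)
      · refine ⟨b :: M, ?_⟩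
        have hc2 : cs + (w.length : Int) ≤ ec := by simpa using hc.2
        simp [pvCollectA, hc.1, hc2, hg, hM]
    · refine ⟨M, ?_⟩
      have hc' : ¬(sc ≤ cs ∧ cs + (w.length : Int) ≤ ec) := by simpa using hc
      simp [pvCollectA, hc', hM]

-- B's loop is A's collecting loop followed by a fold of the accumulator update
theorem pvLoopB_eq_collect (tb : List (Int × Int × Int × Int)) (sc ec : Int)
    (L : List (Int × (String × Int))) (acc : Option (Int × Int × Int × Int)) :
    pvLoopB tb sc ec L acc = (pvCollectA tb sc ec L).map (fun ms => ms.foldl pvUpd acc) := by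
  induction L generalizing acc with
  | nil => rfl
  | cons p rest ih =>
    obtain ⟨i, w, cs⟩ := p
    by_cases hc : cs ≥ sc ∧ cs + PySem.Str.len w ≤ ec
    · have hc2 : cs + (w.length : Int) ≤ ec := by simpa using hc.2
      rcases hg : PySem.List.pyGet? tb i with _ | ⟨x, y, bw, bh⟩
      · simp [pvLoopB, pvCollectA, hc.1, hc2, hg]
      · rcases hM : pvCollectA tb sc ec rest with _ | M <;>
          simp [pvLoopB, pvCollectA, hc.1, hc2, hg, ih, hM, pvUpd, List.foldl_cons]
    · have hc' : ¬(sc ≤ cs ∧ cs + (w.length : Int) ≤ ec) := by simpa using hc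
      simp [pvLoopB, pvCollectA, hc', ih]

-- folding the accumulator over a matched list computes the four running extrema
theorem pvFoldl_upd_some (ms : List (Int × Int × Int × Int)) (a b c d : Int) :
    ms.foldl pvUpd (some (a, b, c, d)) =
      some (ms.foldl (fun v p => min v p.1) a,
            ms.foldl (fun v p => min v p.2.1) b,
            ms.foldl (fun v p => max v (p.1 + p.2.2.1)) c,
            ms.foldl (fun v p => max v (p.2.1 + p.2.2.2)) d) := by
  induction ms generalizing a b c d with
  | nil => rfl
  | cons m rest ih => simp [List.foldl_cons, pvUpd, ih]

-- value of Python's min over a nonempty Int list as a fold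
theorem pvMin?_cons (x : Int) (xs : List Int) :
    PySem.List.min? (x :: xs) (fun v => v) = some (xs.foldl min x) := by
  induction xs generalizing x with
  | nil => simp [PySem.List.min?]
  | cons y rest ih =>
    have h1 : PySem.List.min? (x :: y :: rest) (fun v => v)
        = PySem.List.min? (min x y :: rest) (fun v => v) := by
      simp only [PySem.List.min?, List.foldl_cons]
      rcases lt_or_ge y x with h | h
      · simp [if_pos h, min_eq_right (le_of_lt h)]
      · simp [if_neg (not_lt.2 h), min_eq_left h]
    rw [h1, ih, List.foldl_cons]

-- value of Python's max over a nonempty Int list as a fold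
theorem pvMax?_cons (x : Int) (xs : List Int) :
    PySem.List.max? (x :: xs) (fun v => v) = some (xs.foldl max x) := by
  induction xs generalizing x with
  | nil => simp [PySem.List.max?]
  | cons y rest ih =>
    have h1 : PySem.List.max? (x :: y :: rest) (fun v => v)
        = PySem.List.max? (max x y :: rest) (fun v => v) := by
      simp only [PySem.List.max?, List.foldl_cons]
      rcases lt_or_ge x y with h | h
      · simp [if_pos h, max_eq_right (le_of_lt h)]
      · simp [if_neg (not_lt.2 h), max_eq_left h]
    rw [h1, ih, List.foldl_cons]

-- ===== VERDICT (by name: the statement is the Claim_ definition above) =====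
theorem static_find_bbox_py_spec : Claim_equal_static_find_bbox_py := by
  intro ent_text words token_bboxes word_char_starts start_char end_char _hDom hPre
  unfold Spec_static_find_bbox_py
  obtain ⟨M, hM⟩ := pvCollectA_isSome token_bboxes start_char end_char
    (PySem.List.enumerate (words.zip word_char_starts) 0) hPre
  rcases M with _ | ⟨m, ms⟩
  · simp [static_find_bbox_py, static_find_bbox_py_alt, pvLoopB_eq_collect, hM]
  · obtain ⟨mx, my, mw, mh⟩ := m
    simp only [static_find_bbox_py, static_find_bbox_py_alt, pvLoopB_eq_collect, hM,
      Option.map_some, List.foldl_cons, pvUpd, List.map_cons,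
      pvMin?_cons, pvMax?_cons, pvFoldl_upd_some, Option.getD_some, List.foldl_map]
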